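-- pv_equiv track=rewrite | github.com/JakeJazokas/AutomaticPoliciesForBPFContain | translateToPolicy.py | generate_device_access
-- ===== SOURCE A (Python) =====
-- def generate_device_access(vfsTraces, allowBool):
--     #0: stdin, 1: stdout, 2: stderr
--     output_string = ""
--     terminal_device = False
--     null_device = False
--     terminal_device_deny = False
--     null_device_deny = False
--     for t in vfsTraces:
--         # Negative result = restrict
--         if(not "Return: -" in t):
--             if 'Path: /0' in t or 'Path: /1' in t or 'Path: /2' in t:
--                 terminal_device = True
--             if 'Path: /null' in t:
--                 null_device = True
--         else:
--             if 'Path: /0' in t or 'Path: /1' in t or 'Path: /2' in t: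
--                 terminal_device_deny = True
--             if 'Path: /null' in t:
--                 null_device_deny = True
--     if(allowBool):
--         if terminal_device:
--             output_string += "  - device: terminal\n"
--         if null_device:
--             output_string += "  - device: null\n"
--     elif(not allowBool):
--         if terminal_device_deny:
--             output_string += "  - device: terminal\n"
--         if null_device_deny:
--             output_string += "  - device: null\n"
--     return output_string + "\n"
-- ===== SOURCE B (Python) =====
-- def generate_device_access(vfsTraces, allowBool):
--     # Filter by allow/deny first, then compute only the two needed flags.
--     want_deny = not allowBool
--     relevant = [t for t in vfsTraces if ("Return: -" in t) == want_deny]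
--     terminal = any('Path: /0' in t or 'Path: /1' in t or 'Path: /2' in t for t in relevant)
--     null = any('Path: /null' in t for t in relevant)
--     output_string = ""
--     if terminal:
--         output_string += "  - device: terminal\n"
--     if null:
--         output_string += "  - device: null\n"
--     return output_string + "\n"
-- ===== Notes on version B (the rewrite author's own statement) =====
-- stated objective: simpler
-- what changed: Instead of one loop maintaining four allow/deny flags and a final allowBool branch, B selects the relevant traces by allow/deny up front and computes just the two needed flags with two any-scans.
import Mathlib
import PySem

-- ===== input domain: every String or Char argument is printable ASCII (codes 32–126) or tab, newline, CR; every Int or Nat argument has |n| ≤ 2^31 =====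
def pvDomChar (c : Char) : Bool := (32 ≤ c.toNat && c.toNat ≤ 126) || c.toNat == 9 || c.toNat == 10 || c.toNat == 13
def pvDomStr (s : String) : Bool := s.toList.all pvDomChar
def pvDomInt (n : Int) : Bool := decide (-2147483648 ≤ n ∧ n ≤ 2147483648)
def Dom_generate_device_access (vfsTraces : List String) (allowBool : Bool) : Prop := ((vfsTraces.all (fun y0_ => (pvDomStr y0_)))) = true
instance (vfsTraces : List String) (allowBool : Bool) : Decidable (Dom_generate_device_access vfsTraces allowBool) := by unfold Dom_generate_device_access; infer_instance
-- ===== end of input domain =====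

-- B picks the relevant traces by allow/deny first and computes only the two needed flags; A keeps four flags in one loop.

-- ===== PORT A =====
-- one loop over the traces maintaining four flags (terminal/null × allow/deny), then an allowBool branch;
-- the state tuple is (terminal_device, null_device, terminal_device_deny, null_device_deny)
def generate_device_access (vfsTraces : List String) (allowBool : Bool) : String :=
  let flags := vfsTraces.foldl (fun st t =>
    if !(PySem.Str.isIn "Return: -" t) then
      (if PySem.Str.isIn "Path: /0" t || PySem.Str.isIn "Path: /1" t || PySem.Str.isIn "Path: /2" t then true else st.1,
       if PySem.Str.isIn "Path: /null" t then true else st.2.1,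
       st.2.2.1, st.2.2.2)
    else
      (st.1, st.2.1,
       if PySem.Str.isIn "Path: /0" t || PySem.Str.isIn "Path: /1" t || PySem.Str.isIn "Path: /2" t then true else st.2.2.1,
       if PySem.Str.isIn "Path: /null" t then true else st.2.2.2)) (false, false, false, false)
  let output := ""
  let output :=
    if allowBool then
      let output := if flags.1 then output ++ "  - device: terminal\n" else output
      if flags.2.1 then output ++ "  - device: null\n" else output
    else if !allowBool then
      let output := if flags.2.2.1 then output ++ "  - device: terminal\n" else output
      if flags.2.2.2 then output ++ "  - device: null\n" else output
    else output
  output ++ "\n"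

-- ===== PORT B =====
-- filter by allow/deny first, then two targeted any-scans
def generate_device_access_alt (vfsTraces : List String) (allowBool : Bool) : String :=
  let wantDeny := !allowBool
  let relevant := vfsTraces.filter (fun t => PySem.Str.isIn "Return: -" t == wantDeny)
  let terminal := relevant.any (fun t => PySem.Str.isIn "Path: /0" t || PySem.Str.isIn "Path: /1" t || PySem.Str.isIn "Path: /2" t)
  let nul := relevant.any (fun t => PySem.Str.isIn "Path: /null" t)
  let output := ""
  let output := if terminal then output ++ "  - device: terminal\n" else output
  let output := if nul then output ++ "  - device: null\n" else output
  output ++ "\n"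

-- ===== PRECONDITION & SPEC =====
def Spec_generate_device_access (vfsTraces : List String) (allowBool : Bool) (out : String) : Prop := out = generate_device_access_alt vfsTraces allowBool
instance (vfsTraces : List String) (allowBool : Bool) (out : String) : Decidable (Spec_generate_device_access vfsTraces allowBool out) := by unfold Spec_generate_device_access; infer_instance

-- ===== CLAIM (what is proved, stated in full; the proofs are below) =====
def Claim_equal_generate_device_access : Prop := ∀ (vfsTraces : List String) (allowBool : Bool), Dom_generate_device_access vfsTraces allowBool → Spec_generate_device_access vfsTraces allowBool (generate_device_access vfsTraces allowBool)

-- ===== LEMMAS AND PROOFS =====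

-- A's loop in closed form: each flag is its seed or-ed with an `any` over the list.
theorem pvLoopA (l : List String) (a b c d : Bool) :
    l.foldl (fun st t =>
      if !(PySem.Str.isIn "Return: -" t) then
        (if PySem.Str.isIn "Path: /0" t || PySem.Str.isIn "Path: /1" t || PySem.Str.isIn "Path: /2" t then true else st.1,
         if PySem.Str.isIn "Path: /null" t then true else st.2.1,
         st.2.2.1, st.2.2.2)
      else
        (st.1, st.2.1,
         if PySem.Str.isIn "Path: /0" t || PySem.Str.isIn "Path: /1" t || PySem.Str.isIn "Path: /2" t then true else st.2.2.1,
         if PySem.Str.isIn "Path: /null" t then true else st.2.2.2)) (a, b, c, d)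
    = (a || l.any (fun t => !(PySem.Str.isIn "Return: -" t) && (PySem.Str.isIn "Path: /0" t || PySem.Str.isIn "Path: /1" t || PySem.Str.isIn "Path: /2" t)),
       b || l.any (fun t => !(PySem.Str.isIn "Return: -" t) && PySem.Str.isIn "Path: /null" t),
       c || l.any (fun t => PySem.Str.isIn "Return: -" t && (PySem.Str.isIn "Path: /0" t || PySem.Str.isIn "Path: /1" t || PySem.Str.isIn "Path: /2" t)),
       d || l.any (fun t => PySem.Str.isIn "Return: -" t && PySem.Str.isIn "Path: /null" t)) := by
  induction l generalizing a b c d with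
  | nil => simp
  | cons t l ih =>
    rw [List.foldl_cons]
    cases h : PySem.Str.isIn "Return: -" t <;>
      simp only [h, Bool.not_false, Bool.not_true, if_true, List.any_cons] <;>
      rw [ih] <;>
      cases (PySem.Str.isIn "Path: /0" t || PySem.Str.isIn "Path: /1" t || PySem.Str.isIn "Path: /2" t) <;>
      cases PySem.Str.isIn "Path: /null" t <;> simp

-- B's any-over-filter in the same closed form.
theorem pvAnyFilter (l : List String) (p q : String → Bool) :
    (l.filter p).any q = l.any (fun t => p t && q t) := by
  induction l with
  | nil => rfl
  | cons t l ih =>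
    by_cases h : p t = true <;> simp [h, ih]

-- ===== VERDICT (by name: the statement is the Claim_ definition above) =====
theorem generate_device_access_spec : Claim_equal_generate_device_access := by
  intro vfs allow _
  unfold Spec_generate_device_access generate_device_access generate_device_access_alt
  simp only [pvLoopA, pvAnyFilter, Bool.false_or]
  cases allow <;> simp
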